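-- pv_equiv track=rewrite | github.com/kellyhirano/sensors | get_aqi.py | get_aqi_description
-- ===== SOURCE A (Python) =====
-- def get_aqi_description(aqi):
--     """Take in an AQI, get a description"""
--
--     # https://en.wikipedia.org/wiki/Air_quality_index
--     aqi_defs = {0: {'desc': 'Good', 'color': 'Green'},
--                 51: {'desc': 'Moderate', 'color': 'Yellow'},
--                 101: {'desc': 'Unhealthy for SG', 'color': 'Orange'},
--                 151: {'desc': 'Unhealthy', 'color': 'Red'},
--                 201: {'desc': 'Very Unhealthy', 'color': 'Purple'},
--                 301: {'desc': 'Hazardous', 'color': 'Maroon'}}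
--
--     aqi_mins = sorted(aqi_defs.keys())
--     curr_min = aqi_mins.pop(0)
--
--     for aqi_min in aqi_mins:
--         if aqi < aqi_min:
--             break
--
--         curr_min = aqi_min
--
--     return aqi_defs[curr_min]['desc']
-- ===== SOURCE B (Python) =====
-- import bisect
--
-- _THRESHOLDS = [0, 51, 101, 151, 201, 301]
-- _DESCS = ['Good', 'Moderate', 'Unhealthy for SG', 'Unhealthy',
--           'Very Unhealthy', 'Hazardous']
--
--
-- def get_aqi_description(aqi):
--     """Take in an AQI, get a description"""
--     idx = max(0, bisect.bisect_right(_THRESHOLDS, aqi) - 1)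
--     return _DESCS[idx]
-- ===== Notes on version B (the rewrite author's own statement) =====
-- stated objective: idiomatic
-- what changed: Replaces A's per-call dict construction, sort, pop and linear scan with two module-level aligned constant tables and a bisect_right binary search with a max(0,.) clamp.
import Mathlib
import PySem

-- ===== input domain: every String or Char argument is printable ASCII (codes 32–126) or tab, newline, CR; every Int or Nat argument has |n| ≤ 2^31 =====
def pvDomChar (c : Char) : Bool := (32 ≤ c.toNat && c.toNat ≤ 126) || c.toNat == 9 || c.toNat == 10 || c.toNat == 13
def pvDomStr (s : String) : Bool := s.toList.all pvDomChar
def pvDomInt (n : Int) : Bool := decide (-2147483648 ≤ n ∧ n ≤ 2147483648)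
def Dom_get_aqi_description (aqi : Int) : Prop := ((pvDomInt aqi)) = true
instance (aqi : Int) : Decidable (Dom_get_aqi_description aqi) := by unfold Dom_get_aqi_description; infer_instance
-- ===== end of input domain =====

-- B replaces A's per-call dict build + sort + linear scan with constant aligned tables and a
-- bisect_right binary search clamped by max(0, ·) (idiomatic; same result, no speed claim).

-- ===== PORT A =====
-- A's aqi_defs as an insertion-order dict of (min, desc); only 'desc' is ever read.
def aqiDefsA : PySem.Dict Int String :=
  PySem.Dict.ofList
    [(0, "Good"), (51, "Moderate"), (101, "Unhealthy for SG"),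
     (151, "Unhealthy"), (201, "Very Unhealthy"), (301, "Hazardous")]

-- the 'for aqi_min in aqi_mins: if aqi < aqi_min: break; curr_min = aqi_min' loop
def aqiLoopA (aqi : Int) (curr : Int) : List Int → Int
  | [] => curr
  | m :: rest => if aqi < m then curr else aqiLoopA aqi m rest

def get_aqi_description (aqi : Int) : String :=
  let aqi_mins := PySem.List.sorted (aqiDefsA.keys) (fun (k : Int) => k) false
  -- curr_min = aqi_mins.pop(0)
  match aqi_mins with
  | [] => ""          -- unreachable: the dict has six keys
  | curr_min :: rest =>
      (aqiDefsA.getD (aqiLoopA aqi curr_min rest) "")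

-- ===== PORT B =====
def thresholdsB : List Int := [0, 51, 101, 151, 201, 301]
def descsB : List String :=
  ["Good", "Moderate", "Unhealthy for SG", "Unhealthy", "Very Unhealthy", "Hazardous"]

def get_aqi_description_alt (aqi : Int) : String :=
  let idx := max 0 ((PySem.List.bisectRight thresholdsB aqi : Int) - 1)
  descsB.getD idx.toNat ""

-- ===== PRECONDITION & SPEC =====
def Spec_get_aqi_description (aqi : Int) (out : String) : Prop := out = get_aqi_description_alt aqi
instance (aqi : Int) (out : String) : Decidable (Spec_get_aqi_description aqi out) := by unfold Spec_get_aqi_description; infer_instance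

-- ===== CLAIM (what is proved, stated in full; the proofs are below) =====
def Claim_equal_get_aqi_description : Prop := ∀ (aqi : Int), Dom_get_aqi_description aqi → Spec_get_aqi_description aqi (get_aqi_description aqi)

-- ===== LEMMAS AND PROOFS =====

-- ===== VERDICT (by name: the statement is the Claim_ definition above) =====
theorem get_aqi_description_spec : Claim_equal_get_aqi_description := by
  intro aqi _
  unfold Spec_get_aqi_description get_aqi_description get_aqi_description_alt
  have hsort : PySem.List.sorted (aqiDefsA.keys) (fun (k : Int) => k) false = [0, 51, 101, 151, 201, 301] := by decide
  rw [hsort]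
  rcases lt_or_ge aqi 0 with h0 | h0
  · simp [aqiDefsA, aqiLoopA, thresholdsB, descsB, PySem.List.bisectRight,
      PySem.List.bisectRightLoop, PySem.Dict.getD, PySem.Dict.get?, PySem.Dict.ofList,
      show aqi < 0 from by omega,
      show aqi < 51 from by omega,
      show aqi < 151 from by omega]
    rfl
  rcases lt_or_ge aqi 51 with h1 | h1
  · simp [aqiDefsA, aqiLoopA, thresholdsB, descsB, PySem.List.bisectRight,
      PySem.List.bisectRightLoop, PySem.Dict.getD, PySem.Dict.get?, PySem.Dict.ofList,
      show ¬ aqi < 0 from by omega,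
      show aqi < 51 from by omega,
      show aqi < 151 from by omega]
    rfl
  rcases lt_or_ge aqi 101 with h2 | h2
  · simp [aqiDefsA, aqiLoopA, thresholdsB, descsB, PySem.List.bisectRight,
      PySem.List.bisectRightLoop, PySem.Dict.getD, PySem.Dict.get?, PySem.Dict.ofList,
      show ¬ aqi < 51 from by omega,
      show aqi < 101 from by omega,
      show aqi < 151 from by omega]
    rfl
  rcases lt_or_ge aqi 151 with h3 | h3
  · simp [aqiDefsA, aqiLoopA, thresholdsB, descsB, PySem.List.bisectRight,
      PySem.List.bisectRightLoop, PySem.Dict.getD, PySem.Dict.get?, PySem.Dict.ofList,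
      show ¬ aqi < 51 from by omega,
      show ¬ aqi < 101 from by omega,
      show aqi < 151 from by omega]
    rfl
  rcases lt_or_ge aqi 201 with h4 | h4
  · simp [aqiDefsA, aqiLoopA, thresholdsB, descsB, PySem.List.bisectRight,
      PySem.List.bisectRightLoop, PySem.Dict.getD, PySem.Dict.get?, PySem.Dict.ofList,
      show ¬ aqi < 51 from by omega,
      show ¬ aqi < 101 from by omega,
      show ¬ aqi < 151 from by omega,
      show aqi < 201 from by omega,
      show aqi < 301 from by omega]
    rfl
  rcases lt_or_ge aqi 301 with h5 | h5
  · simp [aqiDefsA, aqiLoopA, thresholdsB, descsB, PySem.List.bisectRight,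
      PySem.List.bisectRightLoop, PySem.Dict.getD, PySem.Dict.get?, PySem.Dict.ofList,
      show ¬ aqi < 51 from by omega,
      show ¬ aqi < 101 from by omega,
      show ¬ aqi < 151 from by omega,
      show ¬ aqi < 201 from by omega,
      show aqi < 301 from by omega]
    rfl
  · simp [aqiDefsA, aqiLoopA, thresholdsB, descsB, PySem.List.bisectRight,
      PySem.List.bisectRightLoop, PySem.Dict.getD, PySem.Dict.get?, PySem.Dict.ofList,
      show ¬ aqi < 51 from by omega,
      show ¬ aqi < 101 from by omega,
      show ¬ aqi < 151 from by omega,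
      show ¬ aqi < 201 from by omega,
      show ¬ aqi < 301 from by omega]
    rfl
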